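-- pv_equiv track=rewrite | github.com/natedey/RINRUS-oldpublic | lib3/read_probe.py | get_res_list
-- ===== SOURCE A (Python) =====
-- def get_res_list(res_atom):
--     res_list = {}
--     for key in sorted(res_atom.keys()):
--         if key[0] not in res_list.keys():
--             res_list[key[0]] = [key[1]]
--         else:
--             res_list[key[0]].append(key[1])
--     return res_list
-- ===== SOURCE B (Python) =====
-- def get_res_list(res_atom):
--     keys = sorted(res_atom.keys())
--     res_list = {}
--     i = 0
--     n = len(keys)
--     while i < n:
--         res = keys[i][0]
--         j = i + 1
--         while j < n and keys[j][0] == res: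
--             j += 1
--         res_list[res] = [k[1] for k in keys[i:j]]
--         i = j
--     return res_list
-- ===== Notes on version B (the rewrite author's own statement) =====
-- stated objective: alternative
-- what changed: Instead of testing membership in the result dict for every key and appending one element at a time, B scans the sorted key list once with two indices, slicing out each maximal run of equal residue ids and binding the whole per-residue list in one assignment.
import Mathlib
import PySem

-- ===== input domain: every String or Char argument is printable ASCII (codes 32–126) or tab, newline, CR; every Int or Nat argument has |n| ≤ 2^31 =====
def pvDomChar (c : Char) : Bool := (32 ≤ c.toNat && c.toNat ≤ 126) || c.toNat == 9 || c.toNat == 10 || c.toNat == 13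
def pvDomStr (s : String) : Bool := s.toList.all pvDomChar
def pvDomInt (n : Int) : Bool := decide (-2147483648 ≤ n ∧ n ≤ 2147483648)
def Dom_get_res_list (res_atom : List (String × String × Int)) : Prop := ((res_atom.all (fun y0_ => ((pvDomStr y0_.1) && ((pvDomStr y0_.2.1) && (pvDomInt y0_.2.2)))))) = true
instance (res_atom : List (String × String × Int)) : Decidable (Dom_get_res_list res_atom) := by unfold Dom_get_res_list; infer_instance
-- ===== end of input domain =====

-- B replaces A's per-key membership test and one-at-a-time appends by a single two-index scan
-- over the sorted key list that emits each maximal run of equal residue ids as one entry (alternative decomposition).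


-- ===== PORT A =====
-- sorted(res_atom.keys()): the dict's keys are the FIRST occurrences of the (res, atom) pairs, sorted as Python tuples (lexicographically)
def pvSortedKeys (res_atom : List (String × String × Int)) : List (String × String) :=
  PySem.List.sorted2 (PySem.List.dedup (res_atom.map (fun e => (e.1, e.2.1)))) (fun k => k.1) (fun k => k.2)

def get_res_list (res_atom : List (String × String × Int)) : List (String × List String) :=
  let res_list : PySem.Dict String (List String) :=
    (pvSortedKeys res_atom).foldl (fun d key =>
      if !(d.contains key.1) then d.insert key.1 [key.2]
      else d.modify key.1 [] (fun l => l ++ [key.2])) PySem.Dict.empty  -- res_list[key[0]].append(key[1])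
  res_list.items

-- ===== PORT B =====
-- the two-index while loops of Source B: each step peels keys[i:j], the maximal run with first component keys[i][0]
def pvGroupRuns : List (String × String) → List (String × List String)
  | [] => []
  | (a, b) :: tl =>
      let grp := tl.takeWhile (fun p => p.1 == a)
      (a, b :: grp.map (fun p => p.2)) :: pvGroupRuns (tl.dropWhile (fun p => p.1 == a))
  termination_by l => l.length
  decreasing_by
    simp only [List.length_cons]
    exact Nat.lt_succ_of_le (List.length_dropWhile_le _ tl)

def get_res_list_alt (res_atom : List (String × String × Int)) : List (String × List String) :=
  pvGroupRuns (pvSortedKeys res_atom)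

-- ===== PRECONDITION & SPEC =====
def Spec_get_res_list (res_atom : List (String × String × Int)) (out : List (String × List String)) : Prop := out = get_res_list_alt res_atom
instance (res_atom : List (String × String × Int)) (out : List (String × List String)) : Decidable (Spec_get_res_list res_atom out) := by unfold Spec_get_res_list; infer_instance

-- ===== CLAIM (what is proved, stated in full; the proofs are below) =====
def Claim_equal_get_res_list : Prop := ∀ (res_atom : List (String × String × Int)), Dom_get_res_list res_atom → Spec_get_res_list res_atom (get_res_list res_atom)

-- ===== LEMMAS AND PROOFS =====

-- A's loop body, named for the proofs
def pvStepA (d : PySem.Dict String (List String)) (key : String × String) : PySem.Dict String (List String) :=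
  if !(d.contains key.1) then d.insert key.1 [key.2]
  else d.modify key.1 [] (fun l => l ++ [key.2])

theorem pvStepA_eq (d : PySem.Dict String (List String)) (key : String × String) :
    (if !(d.contains key.1) then d.insert key.1 [key.2]
     else d.modify key.1 [] (fun l => l ++ [key.2])) = pvStepA d key := rfl

-- sorted2 with identity tuple key IS sorted with the lexicographic key
theorem pvSorted2_eq_sorted_lex (xs : List (String × String)) :
    PySem.List.sorted2 xs (fun k => k.1) (fun k => k.2)
      = PySem.List.sorted xs (fun p => toLex p) := by
  have hb : (fun a b : String × String => decide (a.1 < b.1) || (!decide (b.1 < a.1) && decide (a.2 < b.2)))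
      = (fun a b : String × String => decide (toLex a < toLex b)) := by
    funext a b
    by_cases h1 : a.1 < b.1
    · simp [h1, Prod.Lex.lt_iff]
    · by_cases h2 : b.1 < a.1
      · have : ¬ (toLex a < toLex b) := by
          rw [Prod.Lex.lt_iff]
          push Not
          exact ⟨h1, fun he => absurd (he ▸ h2) (lt_irrefl _)⟩
        simp [h1, h2, this]
      · have he : a.1 = b.1 := le_antisymm (not_lt.mp h2) (not_lt.mp h1)
        simp [he, Prod.Lex.lt_iff]
  unfold PySem.List.sorted2 PySem.List.sorted
  dsimp only
  simp only [Bool.false_eq_true, if_false]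
  rw [hb]

-- the sorted key list is nondecreasing in its first component
theorem pvSortedKeys_pairwise (res_atom : List (String × String × Int)) :
    (pvSortedKeys res_atom).Pairwise (fun p q => p.1 ≤ q.1) := by
  unfold pvSortedKeys
  rw [pvSorted2_eq_sorted_lex]
  refine (PySem.List.sorted_pairwise _ _).imp ?_
  intro p q h
  rcases Prod.Lex.le_iff.mp h with h' | ⟨h', _⟩
  · exact le_of_lt h'
  · exact le_of_eq h'

-- inner run: appending every second component of a run of key a onto the freshly inserted entry
theorem pvFold_run (a : String) :
    ∀ (grp : List (String × String)) (d0 : PySem.Dict String (List String)) (v : List String),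
    (∀ p ∈ grp, p.1 = a) → d0.contains a = false →
    List.foldl pvStepA (d0.insert a v) grp = d0.insert a (v ++ grp.map (fun p => p.2)) := by
  intro grp
  induction grp with
  | nil => intro d0 v _ _; simp
  | cons p grp ih =>
      intro d0 v hall hd0
      have hp : p.1 = a := hall p (List.mem_cons_self)
      have hc : (d0.insert a v).contains p.1 = true := by
        rw [hp]; exact PySem.Dict.contains_insert_self _ _ _
      have hstep : pvStepA (d0.insert a v) p = d0.insert a (v ++ [p.2]) := by
        unfold pvStepA PySem.Dict.modify
        rw [hc, hp]
        simp only [Bool.not_true, Bool.false_eq_true, if_false,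
          PySem.Dict.getD_insert_self, PySem.Dict.insert_insert_self]
      rw [List.foldl_cons, hstep, ih d0 (v ++ [p.2]) (fun q hq => hall q (List.mem_cons_of_mem _ hq)) hd0]
      simp

-- the head of a dropWhile fails the predicate
theorem pvDropHead_false {α : Type} (p : α → Bool) (l : List α) (x : α) (xs : List α)
    (h : l.dropWhile p = x :: xs) : p x = false := by
  induction l with
  | nil => simp at h
  | cons y ys ih =>
    rw [List.dropWhile_cons] at h
    by_cases hy : p y
    · rw [if_pos hy] at h; exact ih h
    · rw [if_neg hy] at h
      injection h with h1 h2
      subst h1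
      simpa using hy

-- after dropping the maximal run of first component a, a never recurs (first components are nondecreasing)
theorem pvDrop_ne (a : String) (tl : List (String × String))
    (hpw : tl.Pairwise (fun p q => p.1 ≤ q.1)) (hle : ∀ q ∈ tl, a ≤ q.1) :
    ∀ r ∈ tl.dropWhile (fun p => p.1 == a), r.1 ≠ a := by
  cases hD : tl.dropWhile (fun p => p.1 == a) with
  | nil => simp
  | cons q rest' =>
    intro r hr
    have hq_ne : q.1 ≠ a := by
      have h : ((fun p : String × String => p.1 == a) q) = false := pvDropHead_false _ tl q rest' hD
      simpa using h
    have hq_mem : q ∈ tl :=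
      (List.dropWhile_sublist _).subset (by rw [hD]; exact List.mem_cons_self)
    have hqa : a < q.1 := lt_of_le_of_ne (hle q hq_mem) (Ne.symm hq_ne)
    rcases List.mem_cons.mp hr with h | h
    · subst h; exact hq_ne
    · have hpwd : (q :: rest').Pairwise (fun p q => p.1 ≤ q.1) := by
        rw [← hD]
        exact List.Pairwise.sublist (List.dropWhile_sublist _) hpw
      have hqr : q.1 ≤ r.1 := (List.pairwise_cons.mp hpwd).1 r h
      exact fun hcon => absurd (hcon ▸ hqr) (not_le.mpr hqa)

-- main loop invariant: on a list whose first components are nondecreasing and all absent from d,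
-- A's fold appends exactly B's groups
theorem pvFold_eq_groups :
    ∀ (n : ℕ) (l : List (String × String)) (d : PySem.Dict String (List String)),
    l.length ≤ n →
    l.Pairwise (fun p q => p.1 ≤ q.1) →
    (∀ p ∈ l, d.contains p.1 = false) →
    (List.foldl pvStepA d l).items = d.items ++ pvGroupRuns l := by
  intro n
  induction n with
  | zero =>
      intro l d hn _ _
      have : l = [] := List.eq_nil_of_length_eq_zero (Nat.le_zero.mp hn)
      subst this; simp [pvGroupRuns]
  | succ n ih =>
      intro l d hn hpw habs
      match l with
      | [] => simp [pvGroupRuns]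
      | (a, b) :: tl =>
        have hda : d.contains a = false := habs (a, b) (List.mem_cons_self)
        have hstep1 : pvStepA d (a, b) = d.insert a [b] := by
          unfold pvStepA; simp [hda]
        have htl : tl.takeWhile (fun p => p.1 == a) ++ tl.dropWhile (fun p => p.1 == a) = tl :=
          List.takeWhile_append_dropWhile
        have hgrpall : ∀ p ∈ tl.takeWhile (fun p => p.1 == a), p.1 = a := by
          intro p hp
          exact eq_of_beq (List.mem_takeWhile_imp (p := fun q : String × String => q.1 == a) hp)
        have hpwtl : tl.Pairwise (fun p q => p.1 ≤ q.1) := hpw.of_cons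
        have hle : ∀ q ∈ tl, a ≤ q.1 := by
          intro q hq
          exact (List.pairwise_cons.mp hpw).1 q hq
        have hrest_ne := pvDrop_ne a tl hpwtl hle
        have hrest_abs : ∀ p ∈ tl.dropWhile (fun p => p.1 == a),
            (d.insert a (b :: (tl.takeWhile (fun p => p.1 == a)).map (fun p => p.2))).contains p.1 = false := by
          intro p hp
          rw [PySem.Dict.contains_insert]
          have h1 : d.contains p.1 = false :=
            habs p (List.mem_cons_of_mem _ ((List.dropWhile_sublist _).subset hp))
          have h2 : (p.1 == a) = false := beq_eq_false_iff_ne.mpr (hrest_ne p hp)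
          simp [h1, h2]
        have hlen : (tl.dropWhile (fun p => p.1 == a)).length ≤ n := by
          have h1 := List.length_dropWhile_le (fun p => p.1 == a) tl
          have h2 : tl.length + 1 ≤ n + 1 := by simpa using hn
          omega
        calc (List.foldl pvStepA d ((a, b) :: tl)).items
            = (List.foldl pvStepA (d.insert a [b])
                (tl.takeWhile (fun p => p.1 == a) ++ tl.dropWhile (fun p => p.1 == a))).items := by
              rw [List.foldl_cons, hstep1, htl]
          _ = (List.foldl pvStepA
                (d.insert a (b :: (tl.takeWhile (fun p => p.1 == a)).map (fun p => p.2)))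
                (tl.dropWhile (fun p => p.1 == a))).items := by
              rw [List.foldl_append, pvFold_run a _ d [b] hgrpall hda]
              rfl
          _ = (d.insert a (b :: (tl.takeWhile (fun p => p.1 == a)).map (fun p => p.2))).items
                ++ pvGroupRuns (tl.dropWhile (fun p => p.1 == a)) :=
              ih _ _ hlen (List.Pairwise.sublist (List.dropWhile_sublist _) hpwtl) hrest_abs
          _ = d.items ++ pvGroupRuns ((a, b) :: tl) := by
              rw [PySem.Dict.items_insert_of_not_contains _ _ hda]
              conv_rhs => rw [pvGroupRuns]
              simp

-- ===== VERDICT (by name: the statement is the Claim_ definition above) =====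
theorem get_res_list_spec : Claim_equal_get_res_list := by
  intro res_atom _
  unfold Spec_get_res_list get_res_list get_res_list_alt
  simp only [pvStepA_eq]
  rw [pvFold_eq_groups (pvSortedKeys res_atom).length _ PySem.Dict.empty le_rfl
      (pvSortedKeys_pairwise res_atom) (fun p _ => by simp [PySem.Dict.contains_empty])]
  rfl
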